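-- pv_equiv track=rewrite | github.com/azowz/coding_chaallenges | done_esey/getBiggestShared.py | getBiggestShared
-- ===== SOURCE A (Python) =====
-- from typing import List
--
-- def getBiggestShared(a: List[int], b: List[int]) -> int:
--     Shared = 0
--     for i in range(len(a)):
--         for j in range(len(b)):
--             if a[i] == b[j]:
--                 if Shared < a[i]:
--                     Shared = a[i]
--
--     return Shared
-- ===== SOURCE B (Python) =====
-- def getBiggestShared(a, b):
--     bs = set(b)
--     return max((x for x in set(a) if x in bs and x > 0), default=0)
-- ===== Notes on version B (the rewrite author's own statement) =====
-- stated objective: faster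
-- what changed: Replaces the nested index-by-index rescan with set membership: build a hash set of b once, then take the max (default 0) of the positive elements of set(a) that are in it.
import Mathlib
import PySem

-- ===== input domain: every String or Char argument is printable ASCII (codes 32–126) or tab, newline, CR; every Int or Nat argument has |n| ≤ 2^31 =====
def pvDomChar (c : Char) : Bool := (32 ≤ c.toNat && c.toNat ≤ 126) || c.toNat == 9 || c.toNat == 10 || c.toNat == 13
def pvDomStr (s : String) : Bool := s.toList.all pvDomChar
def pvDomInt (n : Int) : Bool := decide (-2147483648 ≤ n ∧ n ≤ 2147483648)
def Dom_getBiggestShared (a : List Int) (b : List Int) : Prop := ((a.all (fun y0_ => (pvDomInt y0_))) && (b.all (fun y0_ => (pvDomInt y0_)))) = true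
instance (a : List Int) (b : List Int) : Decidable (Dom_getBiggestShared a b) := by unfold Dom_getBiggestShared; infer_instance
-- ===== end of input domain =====

-- B replaces A's nested index rescan by one pass over set(a) with a hash set of b (faster, O(n+m) vs O(n*m)); return value only, no mutation.

-- ===== PORT A =====
def getBiggestShared (a : List Int) (b : List Int) : Int :=
  (PySem.List.pyRange 0 a.length 1).foldl (fun Shared i =>
    (PySem.List.pyRange 0 b.length 1).foldl (fun Shared j =>
      if PySem.List.pyGetD a i 0 == PySem.List.pyGetD b j 0 then
        (if Shared < PySem.List.pyGetD a i 0 then PySem.List.pyGetD a i 0 else Shared)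
      else Shared) Shared) 0

-- ===== PORT B =====
def getBiggestShared_alt (a : List Int) (b : List Int) : Int :=
  let bs := PySem.Set.ofList b
  ((PySem.List.max?
      ((PySem.Set.ofList a).filter (fun x => PySem.Set.contains bs x && decide (0 < x)))
      (fun y => y)).getD 0)

-- ===== PRECONDITION & SPEC =====
def Spec_getBiggestShared (a : List Int) (b : List Int) (out : Int) : Prop := out = getBiggestShared_alt a b
instance (a : List Int) (b : List Int) (out : Int) : Decidable (Spec_getBiggestShared a b out) := by unfold Spec_getBiggestShared; infer_instance

-- ===== CLAIM (what is proved, stated in full; the proofs are below) =====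
def Claim_equal_getBiggestShared : Prop := ∀ (a : List Int) (b : List Int), Dom_getBiggestShared a b → Spec_getBiggestShared a b (getBiggestShared a b)

-- ===== LEMMAS AND PROOFS =====

-- the predicate "shared with b and positive"
def pvP (b : List Int) (x : Int) : Bool := b.contains x && decide (0 < x)

-- canonical value: running max of the P-elements of l, starting at 0
def pvN (b : List Int) (l : List Int) : Int :=
  l.foldl (fun S x => if pvP b x then max S x else S) 0

theorem pvFoldP_ge (b : List Int) : ∀ (l : List Int) (S : Int),
    S ≤ l.foldl (fun S x => if pvP b x then max S x else S) S := by
  intro l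
  induction l with
  | nil => intro S; simp
  | cons x t ih =>
    intro S
    have h := ih (if pvP b x then max S x else S)
    simp only [List.foldl_cons]
    exact le_trans (by split <;> omega) h

theorem pvFoldP_char (b : List Int) : ∀ (l : List Int) (S : Int), 0 ≤ S →
    l.foldl (fun S x => if pvP b x then max S x else S) S = max S (pvN b l) := by
  intro l
  induction l with
  | nil =>
    intro S hS; simp [pvN]; omega
  | cons x t ih =>
    intro S hS
    have hN : pvN b (x :: t) = max (if pvP b x then max (0:Int) x else 0) (pvN b t) := by
      simp only [pvN, List.foldl_cons]
      exact ih _ (by split <;> omega)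
    have h1 := ih (if pvP b x then max S x else S) (by split <;> omega)
    simp only [List.foldl_cons, h1, hN]
    split <;> omega

theorem pvN_nonneg (b l : List Int) : 0 ≤ pvN b l := pvFoldP_ge b l 0

theorem pvN_le_of_mem (b : List Int) : ∀ (l : List Int) (x : Int),
    x ∈ l → pvP b x = true → x ≤ pvN b l := by
  intro l
  induction l with
  | nil => intro x hx; simp at hx
  | cons y t ih =>
    intro x hx hP
    have : pvN b (y :: t) = max (if pvP b y then max (0:Int) y else 0) (pvN b t) := by
      simp only [pvN, List.foldl_cons]
      exact pvFoldP_char b t _ (by split <;> omega)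
    rcases List.mem_cons.mp hx with h | h
    · subst h; rw [this, if_pos hP]; omega
    · have := ih x h hP; omega

theorem pvN_cases (b : List Int) : ∀ (l : List Int),
    pvN b l = 0 ∨ ∃ x, x ∈ l ∧ pvP b x = true ∧ pvN b l = x := by
  intro l
  induction l with
  | nil => left; simp [pvN]
  | cons y t ih =>
    have hN : pvN b (y :: t) = max (if pvP b y then max (0:Int) y else 0) (pvN b t) := by
      simp only [pvN, List.foldl_cons]
      exact pvFoldP_char b t _ (by split <;> omega)
    by_cases hP : pvP b y = true
    · have hy : 0 < y := by simp [pvP] at hP; exact hP.2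
      rcases ih with h0 | ⟨x, hx, hPx, hv⟩
      · right; exact ⟨y, List.mem_cons_self, hP, by rw [hN, if_pos hP]; omega⟩
      · have hx0 : 0 < x := by simp [pvP] at hPx; exact hPx.2
        by_cases hxy : x ≤ y
        · right; exact ⟨y, List.mem_cons_self, hP, by rw [hN, if_pos hP]; omega⟩
        · right; exact ⟨x, List.mem_cons_of_mem _ hx, hPx, by rw [hN, if_pos hP]; omega⟩
    · have hP' : pvP b y = false := by simpa using hP
      rcases ih with h0 | ⟨x, hx, hPx, hv⟩
      · left; rw [hN, if_neg (by simp [hP'])]; have := pvN_nonneg b t; omega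
      · have hx0 : 0 < x := by simp [pvP] at hPx; exact hPx.2
        right; exact ⟨x, List.mem_cons_of_mem _ hx, hPx, by rw [hN, if_neg (by simp [hP'])]; omega⟩

theorem pvN_mem_cong (b l₁ l₂ : List Int) (h : ∀ x, x ∈ l₁ ↔ x ∈ l₂) :
    pvN b l₁ = pvN b l₂ := by
  have h12 : pvN b l₁ ≤ pvN b l₂ := by
    rcases pvN_cases b l₁ with h1 | ⟨x, hx, hP, hv⟩
    · rw [h1]; exact pvN_nonneg b l₂
    · rw [hv]; exact pvN_le_of_mem b l₂ x ((h x).mp hx) hP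
  have h21 : pvN b l₂ ≤ pvN b l₁ := by
    rcases pvN_cases b l₂ with h1 | ⟨x, hx, hP, hv⟩
    · rw [h1]; exact pvN_nonneg b l₁
    · rw [hv]; exact pvN_le_of_mem b l₁ x ((h x).mpr hx) hP
  omega

-- A's inner loop over b collapses to a single membership test
theorem pvInnerA (ai : Int) : ∀ (bl : List Int) (S : Int),
    bl.foldl (fun S bj => if ai == bj then (if S < ai then ai else S) else S) S
      = if bl.contains ai && decide (S < ai) then ai else S := by
  intro bl
  induction bl with
  | nil => intro S; simp
  | cons bj t ih =>
    intro S
    simp only [List.foldl_cons]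
    by_cases h : ai = bj
    · subst h
      rw [ih]
      by_cases hS : S < ai <;> simp [hS]
    · have hb : (ai == bj) = false := by simpa using h
      rw [hb]
      simp only [if_false, Bool.false_eq_true]
      rw [ih]
      simp [h]

-- A's outer loop, with the inner loop collapsed, matches the canonical value
theorem pvFoldA_char (b : List Int) : ∀ (l : List Int) (S : Int), 0 ≤ S →
    l.foldl (fun S x => if b.contains x && decide (S < x) then x else S) S = max S (pvN b l) := by
  intro l
  induction l with
  | nil => intro S hS; simp [pvN]; omega
  | cons x t ih =>
    intro S hS
    have hN : pvN b (x :: t) = max (if pvP b x then max (0:Int) x else 0) (pvN b t) := by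
      simp only [pvN, List.foldl_cons]
      exact pvFoldP_char b t _ (by split <;> omega)
    have hstep : (if b.contains x && decide (S < x) then x else S)
        = (if pvP b x then max S x else S) := by
      simp only [pvP]
      by_cases hc : x ∈ b <;> by_cases hx : (0:Int) < x <;>
        by_cases hSx : S < x <;> simp [hc, hx, hSx] <;> omega
    have h0 := pvN_nonneg b t
    simp only [List.foldl_cons, hstep]
    rw [ih _ (by split <;> omega), hN]
    split_ifs <;> omega

theorem getBiggestShared_eq_pvN (a b : List Int) :
    getBiggestShared a b = max 0 (pvN b a) := by
  unfold getBiggestShared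
  have hout :
      (PySem.List.pyRange 0 a.length 1).foldl (fun Shared i =>
        (PySem.List.pyRange 0 b.length 1).foldl (fun Shared j =>
          if PySem.List.pyGetD a i 0 == PySem.List.pyGetD b j 0 then
            (if Shared < PySem.List.pyGetD a i 0 then PySem.List.pyGetD a i 0 else Shared)
          else Shared) Shared) 0
      = a.foldl (fun S ai =>
          (PySem.List.pyRange 0 b.length 1).foldl (fun Shared j =>
            if ai == PySem.List.pyGetD b j 0 then
              (if Shared < ai then ai else Shared)
            else Shared) S) 0 := by
    exact PySem.List.foldl_pyRange_zero_pyGetD' a 0 (fun S ai =>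
      (PySem.List.pyRange 0 b.length 1).foldl (fun Shared j =>
        if ai == PySem.List.pyGetD b j 0 then
          (if Shared < ai then ai else Shared)
        else Shared) S) 0
  rw [hout]
  have hin : ∀ (S ai : Int),
      (PySem.List.pyRange 0 b.length 1).foldl (fun Shared j =>
        if ai == PySem.List.pyGetD b j 0 then
          (if Shared < ai then ai else Shared)
        else Shared) S
      = if b.contains ai && decide (S < ai) then ai else S := by
    intro S ai
    rw [PySem.List.foldl_pyRange_zero_pyGetD' b 0
      (fun Shared bj => if ai == bj then (if Shared < ai then ai else Shared) else Shared) S]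
    exact pvInnerA ai b S
  calc a.foldl (fun S ai =>
          (PySem.List.pyRange 0 b.length 1).foldl (fun Shared j =>
            if ai == PySem.List.pyGetD b j 0 then
              (if Shared < ai then ai else Shared)
            else Shared) S) 0
      = a.foldl (fun S ai => if b.contains ai && decide (S < ai) then ai else S) 0 := by
        exact PySem.List.foldl_congr_mem a _ _ 0 (fun S ai _ => hin S ai)
    _ = max 0 (pvN b a) := pvFoldA_char b a 0 le_rfl

theorem getBiggestShared_alt_eq_pvN (a b : List Int) :
    getBiggestShared_alt a b = max 0 (pvN b a) := by
  unfold getBiggestShared_alt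
  have hfilter : (PySem.Set.ofList a).filter (fun x => PySem.Set.contains (PySem.Set.ofList b) x && decide (0 < x))
      = (PySem.Set.ofList a).filter (pvP b) := by
    apply List.filter_congr
    intro x _
    simp [pvP, PySem.Set.contains_eq_listContains, PySem.Set.mem_ofList]
  simp only [hfilter]
  -- max(l, default=0) on the filtered list equals the running max from 0, since every element is positive
  have hmax : ∀ (l : List Int), (∀ x ∈ l, pvP b x = true) →
      (PySem.List.max? l (fun y => y)).getD 0 = l.foldl max 0 := by
    intro l hl
    cases l with
    | nil => simp [PySem.List.max?]
    | cons x t =>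
      rw [PySem.List.max?_id_cons]
      have hx : 0 < x := by
        have := hl x (List.mem_cons_self)
        simp [pvP] at this; exact this.2
      simp only [Option.getD_some, List.foldl_cons]
      have : max (0:Int) x = x := by omega
      rw [this]
  rw [hmax _ (by intro x hx; exact (List.mem_filter.mp hx).2)]
  -- running max over the filtered list = pvN over the dedup list = pvN over a
  have hff : ∀ (l : List Int) (S : Int),
      (l.filter (pvP b)).foldl max S = l.foldl (fun S x => if pvP b x then max S x else S) S := by
    intro l
    induction l with
    | nil => intro S; simp
    | cons x t ih =>
      intro S
      by_cases h : pvP b x = true <;> simp [h, ih]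
  rw [hff]
  have hc := pvN_mem_cong b (PySem.Set.ofList a) a (fun x => PySem.Set.mem_ofList a x)
  have hchar := pvFoldP_char b (PySem.Set.ofList a) 0 le_rfl
  simp only [pvN] at hc hchar ⊢
  rw [hchar, hc]

-- ===== VERDICT (by name: the statement is the Claim_ definition above) =====
theorem getBiggestShared_spec : Claim_equal_getBiggestShared := by
  intro a b _
  unfold Spec_getBiggestShared
  rw [getBiggestShared_eq_pvN, getBiggestShared_alt_eq_pvN]
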